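-- pv_equiv track=rewrite | github.com/VineetKumarRakesh/vedicthg | experiments/benchmarks/run_benchmark.py | _heuristic_word_to_phones
-- ===== SOURCE A (Python) =====
-- from typing import Dict, List, Tuple, Optional
--
-- _VOWELS = {
--     "a": "AH",
--     "e": "EH",
--     "i": "IH",
--     "o": "OW",
--     "u": "UH",
--     "y": "IY",
-- }
--
-- _CONS = {
--     "b": "B", "c": "K", "d": "D", "f": "F", "g": "G", "h": "HH",
--     "j": "JH", "k": "K", "l": "L", "m": "M", "n": "N", "p": "P",
--     "q": "K", "r": "R", "s": "S", "t": "T", "v": "V", "w": "W",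
--     "x": "K", "z": "Z",
-- }
--
-- def _heuristic_word_to_phones(w: str) -> List[str]:
--     out: List[str] = []
--     w = w.strip("'")
--     if not w:
--         return out
--
--     # handle common digraphs quickly
--     w = w.replace("th", " TH ")
--     w = w.replace("sh", " SH ")
--     w = w.replace("ch", " CH ")
--     w = w.replace("ng", " NG ")
--     w = w.replace("ph", " F ")
--
--     tokens = w.split()
--     if len(tokens) > 1:
--         for t in tokens:
--             out.extend(_heuristic_word_to_phones(t))
--         return out
--
--     for ch in w:
--         if ch in _VOWELS:
--             out.append(_VOWELS[ch])
--         elif ch in _CONS: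
--             out.append(_CONS[ch])
--
--     # ensure at least one phoneme
--     if not out:
--         out = ["AH"]
--     return out
-- ===== SOURCE B (Python) =====
-- from typing import List
--
-- _VOWELS = {
--     "a": "AH",
--     "e": "EH",
--     "i": "IH",
--     "o": "OW",
--     "u": "UH",
--     "y": "IY",
-- }
--
-- _CONS = {
--     "b": "B", "c": "K", "d": "D", "f": "F", "g": "G", "h": "HH",
--     "j": "JH", "k": "K", "l": "L", "m": "M", "n": "N", "p": "P",
--     "q": "K", "r": "R", "s": "S", "t": "T", "v": "V", "w": "W",
--     "x": "K", "z": "Z",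
-- }
--
-- _DIGRAPHS = [("th", " TH "), ("sh", " SH "), ("ch", " CH "), ("ng", " NG "), ("ph", " F ")]
--
-- def _heuristic_word_to_phones(w: str) -> List[str]:
--     # Iterative: one flat pass over the whitespace tokens, no recursion.
--     w = w.strip("'")
--     if not w:
--         return []
--     for pat, rep in _DIGRAPHS:
--         w = w.replace(pat, rep)
--     out: List[str] = []
--     for t in w.split():
--         t = t.strip("'")
--         if not t:
--             continue
--         seg = [p for ch in t for p in (_VOWELS.get(ch) or _CONS.get(ch),) if p]
--         out.extend(seg if seg else ["AH"])
--     return out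
-- ===== Notes on version B (the rewrite author's own statement) =====
-- stated objective: simpler
-- what changed: B replaces A's self-recursion over the whitespace tokens of the digraph-expanded word by a single flat loop over those tokens (strip, skip-if-empty, per-character map with per-token 'AH' fallback), with no recursive call.
-- intended difference: On words that strip('\'') to a non-empty string made only of whitespace and apostrophes with at most one apostrophe run (e.g. ' '), A returns ['AH'] while B returns [], matching A's own [] for '' and '\''; an empty word should yield no phonemes. — e.g. on _heuristic_word_to_phones(" "): A returns ["AH"], B returns []
import Mathlib
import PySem

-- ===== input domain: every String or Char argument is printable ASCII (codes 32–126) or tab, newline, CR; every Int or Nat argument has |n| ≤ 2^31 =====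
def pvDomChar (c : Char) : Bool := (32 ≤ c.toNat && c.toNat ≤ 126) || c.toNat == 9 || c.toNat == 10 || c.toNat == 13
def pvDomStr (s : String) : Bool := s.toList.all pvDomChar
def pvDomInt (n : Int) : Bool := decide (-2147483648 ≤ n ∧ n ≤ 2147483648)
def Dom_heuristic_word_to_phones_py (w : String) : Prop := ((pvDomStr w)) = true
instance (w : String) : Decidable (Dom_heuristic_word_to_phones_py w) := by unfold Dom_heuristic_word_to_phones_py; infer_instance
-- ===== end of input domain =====

-- B changes A's token recursion into one flat token loop; equivalence is proved outside D_ (blank/apostrophe-only words), where the two differ as stated.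

-- ===== PORT A =====
-- module constants _VOWELS and _CONS (shared by both Pythons)
def pvVOWELS : PySem.Dict Char String :=
  PySem.Dict.mk [('a', "AH"), ('e', "EH"), ('i', "IH"), ('o', "OW"), ('u', "UH"), ('y', "IY")]

def pvCONS : PySem.Dict Char String :=
  PySem.Dict.mk [('b', "B"), ('c', "K"), ('d', "D"), ('f', "F"), ('g', "G"), ('h', "HH"),
                 ('j', "JH"), ('k', "K"), ('l', "L"), ('m', "M"), ('n', "N"), ('p', "P"),
                 ('q', "K"), ('r', "R"), ('s', "S"), ('t', "T"), ('v', "V"), ('w', "W"),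
                 ('x', "K"), ('z', "Z")]

-- the five w.replace(...) lines of A, in order
def pvReplaceAllA (w : String) : String :=
  let w1 := PySem.Str.replace w "th" " TH "
  let w2 := PySem.Str.replace w1 "sh" " SH "
  let w3 := PySem.Str.replace w2 "ch" " CH "
  let w4 := PySem.Str.replace w3 "ng" " NG "
  PySem.Str.replace w4 "ph" " F "

-- A's recursion, with a fuel guard that only makes the same recursion total
-- (fuel w.length + 2 is never exhausted: the recursion is one level deep, see the lemmas below)
def pvAGo : Nat → String → List String
  | 0, _ => []
  | fuel + 1, w0 =>
    let w := PySem.Str.stripChars w0 "'"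
    if w = "" then []
    else
      let w := pvReplaceAllA w
      let tokens := PySem.Str.split₀ w
      if tokens.length > 1 then
        tokens.foldl (fun out t => out ++ pvAGo fuel t) []
      else
        let out := w.toList.foldl (fun out ch =>
          if pvVOWELS.contains ch then out ++ [pvVOWELS.getD ch ""]
          else if pvCONS.contains ch then out ++ [pvCONS.getD ch ""]
          else out) []
        if out = [] then ["AH"] else out

def heuristic_word_to_phones_py (w : String) : List String := pvAGo (w.length + 2) w

-- ===== PORT B =====
def pvDIGRAPHS : List (String × String) :=
  [("th", " TH "), ("sh", " SH "), ("ch", " CH "), ("ng", " NG "), ("ph", " F ")]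

-- _VOWELS.get(ch) or _CONS.get(ch) (no stored value is falsy)
def pvPhone (ch : Char) : Option String :=
  match pvVOWELS.get? ch with
  | some p => some p
  | none => pvCONS.get? ch

def heuristic_word_to_phones_py_alt (w : String) : List String :=
  let w := PySem.Str.stripChars w "'"
  if w = "" then []
  else
    let w := pvDIGRAPHS.foldl (fun s pr => PySem.Str.replace s pr.1 pr.2) w
    (PySem.Str.split₀ w).foldl (fun out t =>
      let t := PySem.Str.stripChars t "'"
      if t = "" then out
      else
        let seg := t.toList.filterMap pvPhone
        out ++ (if seg = [] then ["AH"] else seg)) []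

-- ===== PRECONDITION & SPEC =====
-- On words whose strip("'") is non-empty but consists only of whitespace and apostrophes
-- forming at most one whitespace-separated token, A returns ["AH"] while B returns [] —
-- matching A's own [] for "" and "'": a blank word should yield no phonemes.
def D_heuristic_word_to_phones_py (w : String) : Prop :=
  let s := PySem.Str.stripChars w "'"
  s ≠ "" ∧ (∀ c ∈ s.toList, PySem.Chars.isspace c = true ∨ c = '\'') ∧
    (PySem.Str.split₀ s).length ≤ 1
instance (w : String) : Decidable (D_heuristic_word_to_phones_py w) := by
  unfold D_heuristic_word_to_phones_py; infer_instance

def Spec_heuristic_word_to_phones_py (w : String) (out : List String) : Prop :=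
  ¬ D_heuristic_word_to_phones_py w → out = heuristic_word_to_phones_py_alt w
instance (w : String) (out : List String) : Decidable (Spec_heuristic_word_to_phones_py w out) := by
  unfold Spec_heuristic_word_to_phones_py; infer_instance

def pvDiffWitness_heuristic_word_to_phones_py : String := " "
def pvDiffWitnessOut_heuristic_word_to_phones_py : (List String) × (List String) := (["AH"], [])

-- ===== CLAIM (what is proved, stated in full; the proofs are below) =====
def Claim_unchanged_heuristic_word_to_phones_py : Prop := ∀ (w : String), Dom_heuristic_word_to_phones_py w → Spec_heuristic_word_to_phones_py w (heuristic_word_to_phones_py w)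
def Claim_changed_heuristic_word_to_phones_py : Prop := Dom_heuristic_word_to_phones_py (pvDiffWitness_heuristic_word_to_phones_py) ∧ D_heuristic_word_to_phones_py (pvDiffWitness_heuristic_word_to_phones_py) ∧ heuristic_word_to_phones_py (pvDiffWitness_heuristic_word_to_phones_py) = pvDiffWitnessOut_heuristic_word_to_phones_py.1 ∧ heuristic_word_to_phones_py_alt (pvDiffWitness_heuristic_word_to_phones_py) = pvDiffWitnessOut_heuristic_word_to_phones_py.2 ∧ pvDiffWitnessOut_heuristic_word_to_phones_py.1 ≠ pvDiffWitnessOut_heuristic_word_to_phones_py.2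
def Claim_exact_heuristic_word_to_phones_py : Prop := ∀ (w : String), Dom_heuristic_word_to_phones_py w → D_heuristic_word_to_phones_py w → heuristic_word_to_phones_py w ≠ heuristic_word_to_phones_py_alt w

-- ===== LEMMAS AND PROOFS =====

def pvRep (o1 o2 : Char) (new : List Char) : List Char → List Char
  | [] => []
  | [c] => [c]
  | c :: d :: t =>
    if c = o1 ∧ d = o2 then new ++ pvRep o1 o2 new t
    else c :: pvRep o1 o2 new (d :: t)
def pvTokens (cur : List Char) : List Char → List (List Char)
  | [] => if cur = [] then [] else [cur]
  | c :: rest =>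
    if PySem.Chars.isspace c then
      if cur = [] then pvTokens [] rest else cur :: pvTokens [] rest
    else pvTokens (cur ++ [c]) rest

lemma pvRep_go_eq (o1 o2 : Char) (new : List Char) :
    ∀ fuel l acc, l.length ≤ fuel →
      PySem.Chars.replace.go [o1, o2] new fuel l acc = acc.reverse ++ pvRep o1 o2 new l := by
  intro fuel
  induction fuel with
  | zero =>
    intro l acc h
    have : l = [] := List.eq_nil_of_length_eq_zero (Nat.le_zero.mp h)
    subst this
    simp [PySem.Chars.replace.go, pvRep]
  | succ n ih =>
    intro l acc h
    match l with
    | [] => simp [PySem.Chars.replace.go, pvRep]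
    | [c] =>
      by_cases hp : ([o1, o2]).isPrefixOf [c]
      · simp [List.isPrefixOf] at hp
      · simp [PySem.Chars.replace.go, hp, pvRep]
        rw [ih [] (c :: acc) (by simp)]
        simp [pvRep]
    | c :: d :: t =>
      by_cases hp : ([o1, o2]).isPrefixOf (c :: d :: t)
      · have hc : c = o1 ∧ d = o2 := by
          simp [List.isPrefixOf] at hp
          exact ⟨hp.1.symm, hp.2.symm⟩
        simp only [PySem.Chars.replace.go, hp, if_pos]
        show PySem.Chars.replace.go [o1,o2] new n (List.drop 2 (c :: d :: t)) (new.reverse ++ acc) = _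
        rw [List.drop_succ_cons, List.drop_succ_cons, List.drop_zero,
            ih t (new.reverse ++ acc) (by simp at h ⊢; omega)]
        simp [pvRep, hc]
      · have hc : ¬ (c = o1 ∧ d = o2) := by
          intro hcd
          apply hp
          simp [List.isPrefixOf, hcd.1, hcd.2]
        simp only [PySem.Chars.replace.go, hp, if_neg, Bool.false_eq_true, not_false_iff]
        rw [ih (d :: t) (c :: acc) (by simp at h ⊢; omega)]
        simp [pvRep, hc]

lemma pvReplace_eq (s : List Char) (o1 o2 : Char) (new : List Char) :
    PySem.Chars.replace s [o1, o2] new = pvRep o1 o2 new s := by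
  rw [PySem.Chars.replace]
  simp [pvRep_go_eq o1 o2 new s.length s [] (le_refl _)]

lemma pvTokens_go_eq :
    ∀ (l cur : List Char) (acc : List (List Char)), PySem.Chars.split₀.go l cur acc = acc.reverse ++ pvTokens cur.reverse l := by
  intro l
  induction l with
  | nil =>
    intro cur acc
    by_cases hc : cur = []
    · subst hc; simp [PySem.Chars.split₀.go, pvTokens]
    · simp [PySem.Chars.split₀.go, pvTokens, hc, List.isEmpty_iff]
  | cons c rest ih =>
    intro cur acc
    by_cases hs : PySem.Chars.isspace c
    · by_cases hc : cur = []
      · subst hc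
        simp [PySem.Chars.split₀.go, hs, pvTokens, ih]
      · simp only [PySem.Chars.split₀.go, hs, if_pos, List.isEmpty_iff, hc, if_neg]
        rw [ih [] (cur.reverse :: acc)]
        simp [pvTokens, hs, hc, List.isEmpty_iff]
    · simp only [PySem.Chars.split₀.go, hs, Bool.false_eq_true, if_neg, not_false_iff]
      rw [ih (c :: cur) acc]
      simp [pvTokens, hs]

lemma pvSplit₀_eq (l : List Char) : PySem.Chars.split₀ l = pvTokens [] l := by
  rw [PySem.Chars.split₀, pvTokens_go_eq]; simp

lemma pvPair_infix_append (a b : Char) (u v : List Char)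
    (h : [a, b] <:+: u ++ v) :
    [a, b] <:+: u ∨ [a, b] <:+: v ∨ (u.getLast? = some a ∧ v.head? = some b) := by
  induction u with
  | nil => right; left; simpa using h
  | cons c u' ih =>
    rw [List.cons_append, List.infix_cons_iff] at h
    rcases h with ⟨r, hr⟩ | h
    · match u', hr with
      | [], hr =>
        simp at hr
        right; right
        exact ⟨by simp [hr.1], by rw [← hr.2]; simp⟩
      | d :: u'', hr =>
        simp at hr
        left
        exact ⟨[], u'', by simp [hr.1, hr.2.1]⟩
    · rcases ih h with h1 | h1 | h1
      · left; exact h1.trans (List.suffix_cons c u').isInfix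
      · right; left; exact h1
      · right; right
        refine ⟨?_, h1.2⟩
        have hne : u' ≠ [] := by
          intro he; rw [he] at h1; simp at h1
        cases u' with
        | nil => exact absurd rfl hne
        | cons x xs => rw [List.getLast?_cons_cons]; exact h1.1

lemma pvInfix_tail (a b c : Char) (t : List Char) (h : [a, b] <:+: t) : [a, b] <:+: c :: t :=
  h.trans (List.suffix_cons c t).isInfix

lemma pvRep_id (o1 o2 : Char) (new l : List Char) (h : ¬ [o1, o2] <:+: l) :
    pvRep o1 o2 new l = l := by
  fun_induction pvRep o1 o2 new l with
  | case1 => rfl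
  | case2 c => rfl
  | case3 c d t hc ih =>
    exact absurd ⟨[], t, by simp [hc.1, hc.2]⟩ h
  | case4 c d t hc ih =>
    rw [ih (fun h' => h (pvInfix_tail _ _ _ _ h'))]

lemma pvRep_head (o1 o2 : Char) (new l : List Char) (b : Char)
    (hnewlow : ∀ c ∈ new, PySem.Chars.islower c = false) (hnewne : new ≠ [])
    (hb : PySem.Chars.islower b = true)
    (h : (pvRep o1 o2 new l).head? = some b) : l.head? = some b := by
  fun_induction pvRep o1 o2 new l with
  | case1 => simp [pvRep] at h
  | case2 c => exact h
  | case3 c d t hc ih =>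
    match new, hnewne with
    | n0 :: ns, _ =>
      simp at h
      have := hnewlow n0 (by simp)
      rw [h, hb] at this; cases this
  | case4 c d t hc ih => exact h

lemma pvRep_pair_back (o1 o2 a b : Char) (new l : List Char)
    (hnewlow : ∀ c ∈ new, PySem.Chars.islower c = false) (hnewne : new ≠ [])
    (ha : PySem.Chars.islower a = true) (hb : PySem.Chars.islower b = true)
    (h : [a, b] <:+: pvRep o1 o2 new l) : [a, b] <:+: l := by
  fun_induction pvRep o1 o2 new l with
  | case1 => simpa using h
  | case2 c =>
    exact h
  | case3 c d t hc ih =>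
    rcases pvPair_infix_append a b new _ h with h1 | h1 | h1
    · have : a ∈ new := h1.subset (by simp)
      rw [hnewlow a this] at ha; cases ha
    · exact pvInfix_tail _ _ _ _ (pvInfix_tail _ _ _ _ (ih h1))
    · have : a ∈ new := by
        rcases h1 with ⟨hl, _⟩
        exact List.mem_of_mem_getLast? hl
      rw [hnewlow a this] at ha; cases ha
  | case4 c d t hc ih =>
    rw [List.infix_cons_iff] at h
    rcases h with ⟨r, hr⟩ | h
    · -- [a,b] ++ r = c :: pvRep (d::t)
      simp at hr
      have hd : (pvRep o1 o2 new (d :: t)).head? = some b := by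
        rw [← hr.2]; simp
      have := pvRep_head o1 o2 new (d :: t) b hnewlow hnewne hb hd
      simp at this
      exact ⟨[], t, by simp [hr.1, this]⟩
    · exact pvInfix_tail _ _ _ _ (ih h)

lemma pvRep_no_self (o1 o2 : Char) (new l : List Char)
    (hnewlow : ∀ c ∈ new, PySem.Chars.islower c = false) (hnewne : new ≠ [])
    (ho1 : PySem.Chars.islower o1 = true) (ho2 : PySem.Chars.islower o2 = true) :
    ¬ [o1, o2] <:+: pvRep o1 o2 new l := by
  fun_induction pvRep o1 o2 new l with
  | case1 => simp
  | case2 c =>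
    intro h
    have := h.length_le
    simp at this
  | case3 c d t hc ih =>
    intro h
    rcases pvPair_infix_append o1 o2 new _ h with h1 | h1 | h1
    · have : o1 ∈ new := h1.subset (by simp)
      rw [hnewlow o1 this] at ho1; cases ho1
    · exact ih h1
    · have : o1 ∈ new := List.mem_of_mem_getLast? h1.1
      rw [hnewlow o1 this] at ho1; cases ho1
  | case4 c d t hc ih =>
    intro h
    rw [List.infix_cons_iff] at h
    rcases h with ⟨r, hr⟩ | h
    · simp at hr
      have hd : (pvRep o1 o2 new (d :: t)).head? = some o2 := by
        rw [← hr.2]; simp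
      have := pvRep_head o1 o2 new (d :: t) o2 hnewlow hnewne ho2 hd
      simp at this
      exact hc ⟨hr.1.symm, this⟩
  
    · exact ih h

lemma pvRep_core (o1 o2 : Char) (new l : List Char)
    (hnew : ∃ c ∈ new, PySem.Chars.isspace c = false ∧ c ≠ '\'')
    (h : ∃ c ∈ l, PySem.Chars.isspace c = false ∧ c ≠ '\'') :
    ∃ c ∈ pvRep o1 o2 new l, PySem.Chars.isspace c = false ∧ c ≠ '\'' := by
  fun_induction pvRep o1 o2 new l with
  | case1 => simpa using h
  | case2 c => exact h
  | case3 c d t hc ih =>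
    rcases hnew with ⟨c0, hc0, hcore⟩
    exact ⟨c0, by simp [hc0], hcore⟩
  | case4 c d t hc ih =>
    rcases h with ⟨c0, hc0, hcore⟩
    rcases List.mem_cons.mp hc0 with h0 | h0
    · exact ⟨c0, by simp [h0], hcore⟩
    · rcases ih ⟨c0, h0, hcore⟩ with ⟨c1, h1, hcore1⟩
      exact ⟨c1, by simp [h1], hcore1⟩

lemma pvTokens_flat {α : Type} (f : Char → Option α)
    (hf : ∀ c, PySem.Chars.isspace c = true → f c = none) :
    ∀ (l cur : List Char),
      (pvTokens cur l).flatMap (List.filterMap f) = cur.filterMap f ++ l.filterMap f := by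
  intro l
  induction l with
  | nil =>
    intro cur
    by_cases hc : cur = [] <;> simp [pvTokens, hc]
  | cons c rest ih =>
    intro cur
    by_cases hs : PySem.Chars.isspace c
    · by_cases hc : cur = []
      · simp [pvTokens, hs, hc, ih, List.filterMap_cons, hf c hs]
      · simp [pvTokens, hs, hc, ih, List.filterMap_cons, hf c hs]
    · have : List.filterMap f (cur ++ [c]) = cur.filterMap f ++ (f c).toList := by
        simp [List.filterMap_append]
        cases hfc : f c <;> simp [List.filterMap_cons, hfc]
      simp only [pvTokens, hs, Bool.false_eq_true, if_neg, not_false_iff, ih, this]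
      cases hfc : f c <;> simp [List.filterMap_cons, hfc]

lemma pvTokens_mem :
    ∀ (l cur : List Char) (t : List Char), (∀ c ∈ cur, PySem.Chars.isspace c = false) →
      t ∈ pvTokens cur l → t <:+: (cur ++ l) ∧ ∀ c ∈ t, PySem.Chars.isspace c = false := by
  intro l
  induction l with
  | nil =>
    intro cur t hcur ht
    by_cases hc : cur = [] <;> simp [pvTokens, hc] at ht
    subst ht
    exact ⟨by simp, hcur⟩
  | cons c rest ih =>
    intro cur t hcur ht
    by_cases hs : PySem.Chars.isspace c
    · by_cases hc : cur = []
      · subst hc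
        simp only [pvTokens, hs, if_pos, if_pos rfl] at ht
        rcases ih [] t (by simp) ht with ⟨h1, h2⟩
        exact ⟨(by simpa using h1 : t <:+: rest).trans (List.suffix_cons c rest).isInfix, h2⟩
      · simp only [pvTokens, hs, if_pos, hc, if_neg, not_false_iff] at ht
        rcases List.mem_cons.mp ht with h | h
        · subst h
          exact ⟨⟨[], c :: rest, by simp⟩, hcur⟩
        · rcases ih [] t (by simp) h with ⟨h1, h2⟩
          refine ⟨h1.trans ?_, h2⟩
          simp
          exact ((List.suffix_cons c rest).trans (List.suffix_append cur (c :: rest))).isInfix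
    · simp only [pvTokens, hs, Bool.false_eq_true, if_neg, not_false_iff] at ht
      have hcur' : ∀ x ∈ cur ++ [c], PySem.Chars.isspace x = false := by
        intro x hx
        rcases List.mem_append.mp hx with h | h
        · exact hcur x h
        · simp at h; subst h; simpa using hs
      rcases ih (cur ++ [c]) t hcur' ht with ⟨h1, h2⟩
      exact ⟨by simpa using h1, h2⟩

lemma pvTokens_nosplit :
    ∀ (l cur : List Char), (∀ c ∈ l, PySem.Chars.isspace c = false) →
      pvTokens cur l = if cur ++ l = [] then [] else [cur ++ l] := by
  intro l
  induction l with
  | nil => intro cur h; by_cases hc : cur = [] <;> simp [pvTokens, hc]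
  | cons c rest ih =>
    intro cur h
    have hs : PySem.Chars.isspace c = false := h c (by simp)
    simp only [pvTokens, hs, Bool.false_eq_true, if_neg, not_false_iff]
    rw [ih (cur ++ [c]) (fun x hx => h x (by simp [hx]))]
    simp

lemma pvStrip_infix (l chars : List Char) : PySem.Chars.stripChars l chars <:+: l := by
  rw [PySem.Chars.stripChars]
  have h1 : List.dropWhile (fun c => chars.contains c) l <:+ l := List.dropWhile_suffix _
  have h2 : (List.dropWhile (fun c => chars.contains c)
      (List.dropWhile (fun c => chars.contains c) l).reverse).reverse <+:
      List.dropWhile (fun c => chars.contains c) l := by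
    have := List.dropWhile_suffix (l := (List.dropWhile (fun c => chars.contains c) l).reverse)
      (fun c => chars.contains c)
    rcases this with ⟨pre, hpre⟩
    exact ⟨pre.reverse, by rw [← List.reverse_append, hpre, List.reverse_reverse]⟩
  exact h2.isInfix.trans h1.isInfix

lemma pvFilterMap_dropWhile {α : Type} (f : Char → Option α) (p : Char → Bool)
    (hf : ∀ c, p c = true → f c = none) :
    ∀ l : List Char, (List.dropWhile p l).filterMap f = l.filterMap f := by
  intro l
  induction l with
  | nil => simp
  | cons c t ih =>
    by_cases hp : p c
    · simp [List.dropWhile_cons, hp, ih, List.filterMap_cons, hf c hp]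
    · simp [List.dropWhile_cons, hp]

lemma pvFilterMap_strip {α : Type} (f : Char → Option α) (hf : f '\'' = none) (l : List Char) :
    (PySem.Chars.stripChars l ['\'']).filterMap f = l.filterMap f := by
  rw [PySem.Chars.stripChars]
  have hp : ∀ c, (['\''].contains c) = true → f c = none := by
    intro c hc
    simp at hc
    subst hc; exact hf
  rw [show ∀ m : List Char, List.filterMap f m.reverse = (List.filterMap f m).reverse from
        fun m => List.filterMap_reverse,
      pvFilterMap_dropWhile f _ hp,
      show ∀ m : List Char, List.filterMap f m.reverse = (List.filterMap f m).reverse from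
        fun m => List.filterMap_reverse,
      pvFilterMap_dropWhile f _ hp, List.reverse_reverse]

lemma pvStrip_nil_iff (l : List Char) :
    PySem.Chars.stripChars l ['\''] = [] ↔ ∀ c ∈ l, c = '\'' := by
  rw [PySem.Chars.stripChars]
  constructor
  · intro h c hc
    have h' : List.dropWhile (fun c => (['\''].contains c)) ((List.dropWhile (fun c => (['\''].contains c)) l).reverse) = [] :=
      List.reverse_eq_nil_iff.mp h
    rw [List.dropWhile_eq_nil_iff] at h'
    have hall : ∀ x ∈ List.dropWhile (fun c => (['\''].contains c)) l, x = '\'' := by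
      intro x hx
      have := h' x (by simpa using hx)
      simpa using this
    have := List.takeWhile_append_dropWhile (p := fun c => (['\''].contains c)) (l := l)
    rcases List.mem_append.mp (by rw [this]; exact hc :
        c ∈ List.takeWhile (fun c => (['\''].contains c)) l ++ List.dropWhile (fun c => (['\''].contains c)) l) with h | h
    · have := List.mem_takeWhile_imp h
      simpa using this
    · exact hall c h
  · intro h
    have h1 : List.dropWhile (fun c => (['\''].contains c)) l = [] := by
      rw [List.dropWhile_eq_nil_iff]
      intro x hx; simpa using h x hx
    rw [h1]
    simp

lemma pvPhone_space (c : Char) (h : PySem.Chars.isspace c = true) : pvPhone c = none := by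
  have hv : pvVOWELS.get? c = none := by
    rw [PySem.Dict.get?_eq_none_iff_not_mem_keys]
    intro hm
    simp [pvVOWELS, PySem.Dict.keys_mk] at hm
    rcases hm with rfl | rfl | rfl | rfl | rfl | rfl <;> revert h <;> decide
  have hc : pvCONS.get? c = none := by
    rw [PySem.Dict.get?_eq_none_iff_not_mem_keys]
    intro hm
    simp [pvCONS, PySem.Dict.keys_mk] at hm
    rcases hm with rfl|rfl|rfl|rfl|rfl|rfl|rfl|rfl|rfl|rfl|rfl|rfl|rfl|rfl|rfl|rfl|rfl|rfl|rfl|rfl <;>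
      revert h <;> decide
  simp [pvPhone, hv, hc]

lemma pvAScan (l : List Char) : ∀ acc : List String,
    l.foldl (fun out ch =>
      if pvVOWELS.contains ch then out ++ [pvVOWELS.getD ch ""]
      else if pvCONS.contains ch then out ++ [pvCONS.getD ch ""]
      else out) acc = acc ++ l.filterMap pvPhone := by
  induction l with
  | nil => intro acc; simp
  | cons c t ih =>
    intro acc
    have hstep : (if pvVOWELS.contains c then acc ++ [pvVOWELS.getD c ""]
      else if pvCONS.contains c then acc ++ [pvCONS.getD c ""]
      else acc) = acc ++ (pvPhone c).toList := by
      rw [PySem.Dict.contains_eq_isSome_get?, PySem.Dict.contains_eq_isSome_get?,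
          PySem.Dict.getD_eq_get?_getD, PySem.Dict.getD_eq_get?_getD]
      cases hv : pvVOWELS.get? c with
      | some p => simp [pvPhone, hv]
      | none =>
        cases hc : pvCONS.get? c with
        | some p => simp [pvPhone, hv, hc]
        | none => simp [pvPhone, hv, hc]
    rw [List.foldl_cons, hstep, ih, List.filterMap_cons]
    cases hp : pvPhone c <;> simp [hp]

set_option maxRecDepth 2000

def pvTH : List Char := [' ', 'T', 'H', ' ']
def pvSH : List Char := [' ', 'S', 'H', ' ']
def pvCH : List Char := [' ', 'C', 'H', ' ']
def pvNG : List Char := [' ', 'N', 'G', ' ']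
def pvF : List Char := [' ', 'F', ' ']

lemma pvTH_nolow : ∀ c ∈ pvTH, PySem.Chars.islower c = false := by
  intro c hc; fin_cases hc <;> decide
lemma pvSH_nolow : ∀ c ∈ pvSH, PySem.Chars.islower c = false := by
  intro c hc; fin_cases hc <;> decide
lemma pvCH_nolow : ∀ c ∈ pvCH, PySem.Chars.islower c = false := by
  intro c hc; fin_cases hc <;> decide
lemma pvNG_nolow : ∀ c ∈ pvNG, PySem.Chars.islower c = false := by
  intro c hc; fin_cases hc <;> decide
lemma pvF_nolow : ∀ c ∈ pvF, PySem.Chars.islower c = false := by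
  intro c hc; fin_cases hc <;> decide
lemma pvTH_core : ∃ c ∈ pvTH, PySem.Chars.isspace c = false ∧ c ≠ '\'' :=
  ⟨'T', by simp [pvTH], by decide⟩
lemma pvSH_core : ∃ c ∈ pvSH, PySem.Chars.isspace c = false ∧ c ≠ '\'' :=
  ⟨'S', by simp [pvSH], by decide⟩
lemma pvCH_core : ∃ c ∈ pvCH, PySem.Chars.isspace c = false ∧ c ≠ '\'' :=
  ⟨'C', by simp [pvCH], by decide⟩
lemma pvNG_core : ∃ c ∈ pvNG, PySem.Chars.isspace c = false ∧ c ≠ '\'' :=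
  ⟨'N', by simp [pvNG], by decide⟩
lemma pvF_core : ∃ c ∈ pvF, PySem.Chars.isspace c = false ∧ c ≠ '\'' :=
  ⟨'F', by simp [pvF], by decide⟩

def pvRepAll (l : List Char) : List Char :=
  pvRep 'p' 'h' pvF (pvRep 'n' 'g' pvNG (pvRep 'c' 'h' pvCH (pvRep 's' 'h' pvSH (pvRep 't' 'h' pvTH l))))

-- every lowercase digraph is absent from pvRepAll l
lemma pvRepAll_no_th (l : List Char) : ¬ ['t', 'h'] <:+: pvRepAll l := fun h =>
  pvRep_no_self 't' 'h' pvTH l pvTH_nolow (by decide) (by decide) (by decide)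
    (pvRep_pair_back 's' 'h' 't' 'h' pvSH _ pvSH_nolow (by decide) (by decide) (by decide)
      (pvRep_pair_back 'c' 'h' 't' 'h' pvCH _ pvCH_nolow (by decide) (by decide) (by decide)
        (pvRep_pair_back 'n' 'g' 't' 'h' pvNG _ pvNG_nolow (by decide) (by decide) (by decide)
          (pvRep_pair_back 'p' 'h' 't' 'h' pvF _ pvF_nolow (by decide) (by decide) (by decide) h))))

lemma pvRepAll_no_sh (l : List Char) : ¬ ['s', 'h'] <:+: pvRepAll l := fun h =>
  pvRep_no_self 's' 'h' pvSH _ pvSH_nolow (by decide) (by decide) (by decide)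
    (pvRep_pair_back 'c' 'h' 's' 'h' pvCH _ pvCH_nolow (by decide) (by decide) (by decide)
      (pvRep_pair_back 'n' 'g' 's' 'h' pvNG _ pvNG_nolow (by decide) (by decide) (by decide)
        (pvRep_pair_back 'p' 'h' 's' 'h' pvF _ pvF_nolow (by decide) (by decide) (by decide) h)))

lemma pvRepAll_no_ch (l : List Char) : ¬ ['c', 'h'] <:+: pvRepAll l := fun h =>
  pvRep_no_self 'c' 'h' pvCH _ pvCH_nolow (by decide) (by decide) (by decide)
    (pvRep_pair_back 'n' 'g' 'c' 'h' pvNG _ pvNG_nolow (by decide) (by decide) (by decide)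
      (pvRep_pair_back 'p' 'h' 'c' 'h' pvF _ pvF_nolow (by decide) (by decide) (by decide) h))

lemma pvRepAll_no_ng (l : List Char) : ¬ ['n', 'g'] <:+: pvRepAll l := fun h =>
  pvRep_no_self 'n' 'g' pvNG _ pvNG_nolow (by decide) (by decide) (by decide)
    (pvRep_pair_back 'p' 'h' 'n' 'g' pvF _ pvF_nolow (by decide) (by decide) (by decide) h)

lemma pvRepAll_no_ph (l : List Char) : ¬ ['p', 'h'] <:+: pvRepAll l := fun h =>
  pvRep_no_self 'p' 'h' pvF _ pvF_nolow (by decide) (by decide) (by decide) h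

lemma pvRepAll_core (l : List Char)
    (h : ∃ c ∈ l, PySem.Chars.isspace c = false ∧ c ≠ '\'') :
    ∃ c ∈ pvRepAll l, PySem.Chars.isspace c = false ∧ c ≠ '\'' :=
  pvRep_core 'p' 'h' pvF _ pvF_core
    (pvRep_core 'n' 'g' pvNG _ pvNG_core
      (pvRep_core 'c' 'h' pvCH _ pvCH_core
        (pvRep_core 's' 'h' pvSH _ pvSH_core
          (pvRep_core 't' 'h' pvTH _ pvTH_core h))))

lemma pvNoPat_of_wsap (l : List Char)
    (h : ∀ c ∈ l, PySem.Chars.isspace c = true ∨ c = '\'')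
    (a b : Char) (ha : PySem.Chars.isspace a = false ∧ a ≠ '\'') : ¬ [a, b] <:+: l := by
  intro hin
  have := h a (hin.subset (by simp))
  rcases this with h1 | h1
  · rw [h1] at ha; exact Bool.noConfusion ha.1
  · exact ha.2 h1

lemma pvRepAll_id_of_wsap (l : List Char)
    (h : ∀ c ∈ l, PySem.Chars.isspace c = true ∨ c = '\'') : pvRepAll l = l := by
  rw [pvRepAll,
      pvRep_id 't' 'h' pvTH l (pvNoPat_of_wsap l h 't' 'h' (by decide)),
      pvRep_id 's' 'h' pvSH l (pvNoPat_of_wsap l h 's' 'h' (by decide)),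
      pvRep_id 'c' 'h' pvCH l (pvNoPat_of_wsap l h 'c' 'h' (by decide)),
      pvRep_id 'n' 'g' pvNG l (pvNoPat_of_wsap l h 'n' 'g' (by decide)),
      pvRep_id 'p' 'h' pvF l (pvNoPat_of_wsap l h 'p' 'h' (by decide))]

lemma pvRepAll_id_of_nodigraph (l : List Char)
    (h1 : ¬ ['t', 'h'] <:+: l) (h2 : ¬ ['s', 'h'] <:+: l) (h3 : ¬ ['c', 'h'] <:+: l)
    (h4 : ¬ ['n', 'g'] <:+: l) (h5 : ¬ ['p', 'h'] <:+: l) : pvRepAll l = l := by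
  rw [pvRepAll, pvRep_id 't' 'h' pvTH l h1, pvRep_id 's' 'h' pvSH l h2,
      pvRep_id 'c' 'h' pvCH l h3, pvRep_id 'n' 'g' pvNG l h4, pvRep_id 'p' 'h' pvF l h5]

-- bridge facts
lemma pvToList_ofList (l : List Char) : (String.ofList l).toList = l := by simp

lemma pvOfList_eq_empty (l : List Char) : (String.ofList l = "") ↔ l = [] := by simp

lemma pvStrip_ofList (t : List Char) :
    PySem.Str.stripChars (String.ofList t) "'" = String.ofList (PySem.Chars.stripChars t ['\'']) := by
  rw [PySem.Str.stripChars]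
  congr 1
  simp

lemma pvReplaceAllA_toList (s : String) :
    (pvReplaceAllA s).toList = pvRepAll s.toList := by
  simp only [pvReplaceAllA, PySem.Str.replace, pvToList_ofList]
  rw [show ("th" : String).toList = ['t','h'] from by decide,
      show ("sh" : String).toList = ['s','h'] from by decide,
      show ("ch" : String).toList = ['c','h'] from by decide,
      show ("ng" : String).toList = ['n','g'] from by decide,
      show ("ph" : String).toList = ['p','h'] from by decide,
      show (" TH " : String).toList = pvTH from by decide,
      show (" SH " : String).toList = pvSH from by decide,
      show (" CH " : String).toList = pvCH from by decide,
      show (" NG " : String).toList = pvNG from by decide,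
      show (" F " : String).toList = pvF from by decide,
      pvReplace_eq, pvReplace_eq, pvReplace_eq, pvReplace_eq, pvReplace_eq]
  rfl

lemma pvSplit₀_str (s : String) :
    PySem.Str.split₀ s = (pvTokens [] s.toList).map String.ofList := by
  rw [PySem.Str.split₀, pvSplit₀_eq]

def pvBContrib (t : List Char) : List String :=
  let t' := PySem.Chars.stripChars t ['\'']
  if t' = [] then []
  else if t'.filterMap pvPhone = [] then ["AH"] else t'.filterMap pvPhone

lemma pvBfold : ∀ (T : List (List Char)) (acc : List String),
    (T.map String.ofList).foldl (fun out ts =>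
      let t := PySem.Str.stripChars ts "'"
      if t = "" then out
      else
        let seg := t.toList.filterMap pvPhone
        out ++ (if seg = [] then ["AH"] else seg)) acc
    = acc ++ T.flatMap pvBContrib := by
  intro T
  induction T with
  | nil => intro acc; simp
  | cons t T ih =>
    intro acc
    rw [List.map_cons, List.foldl_cons]
    have hstep : (let t1 := PySem.Str.stripChars (String.ofList t) "'"
        if t1 = "" then acc
        else
          let seg := t1.toList.filterMap pvPhone
          acc ++ (if seg = [] then ["AH"] else seg)) = acc ++ pvBContrib t := by
      rw [pvStrip_ofList]
      by_cases h : PySem.Chars.stripChars t ['\''] = []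
      · simp [h, pvBContrib]
      · simp only [pvOfList_eq_empty, h, if_neg, not_false_iff, pvToList_ofList, pvBContrib]
        try split_ifs <;> simp_all
    rw [hstep, ih]
    simp [pvBContrib]

lemma pvToken_eval (fuel : Nat) (t : List Char)
    (hws : ∀ c ∈ t, PySem.Chars.isspace c = false)
    (h1 : ¬ ['t', 'h'] <:+: t) (h2 : ¬ ['s', 'h'] <:+: t) (h3 : ¬ ['c', 'h'] <:+: t)
    (h4 : ¬ ['n', 'g'] <:+: t) (h5 : ¬ ['p', 'h'] <:+: t) :
    pvAGo (fuel + 1) (String.ofList t) = pvBContrib t := by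
  rw [pvAGo]
  simp only [pvStrip_ofList]
  set s := PySem.Chars.stripChars t ['\''] with hs
  by_cases hnil : s = []
  · simp [hnil, pvBContrib, ← hs]
  · simp only [pvOfList_eq_empty, hnil, if_neg, not_false_iff]
    have hsub : s <:+: t := pvStrip_infix t ['\'']
    have hid : pvRepAll s = s := by
      refine pvRepAll_id_of_nodigraph s ?_ ?_ ?_ ?_ ?_ <;>
        intro hq
      · exact h1 (hq.trans hsub)
      · exact h2 (hq.trans hsub)
      · exact h3 (hq.trans hsub)
      · exact h4 (hq.trans hsub)
      · exact h5 (hq.trans hsub)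
    have hrep : (pvReplaceAllA (String.ofList s)).toList = s := by
      rw [pvReplaceAllA_toList, pvToList_ofList, hid]
    have htok : PySem.Str.split₀ (pvReplaceAllA (String.ofList s)) = [String.ofList s] := by
      rw [pvSplit₀_str, hrep, pvTokens_nosplit s []
        (fun c hc => hws c (hsub.subset hc))]
      simp [hnil]
    rw [htok]
    simp only [List.length_cons, List.length_nil, gt_iff_lt, Nat.lt_irrefl, if_neg, not_false_iff]
    rw [hrep, pvAScan]
    simp only [List.nil_append, pvBContrib, ← hs, hnil, if_neg, not_false_iff]
    try rfl

lemma pvStrip_str (s : String) :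
    PySem.Str.stripChars s "'" = String.ofList (PySem.Chars.stripChars s.toList ['\'']) := by
  rw [PySem.Str.stripChars]
  congr 1 <;> simp

lemma pvFilterMap_nil {α : Type} (f : Char → Option α) (l : List Char)
    (h : ∀ c ∈ l, f c = none) : l.filterMap f = [] := by
  induction l with
  | nil => simp
  | cons c t ih => simp [List.filterMap_cons, h c (by simp), ih (fun x hx => h x (by simp [hx]))]

lemma pvAlt_char (w : String) :
    heuristic_word_to_phones_py_alt w = if PySem.Chars.stripChars w.toList ['\''] = [] then []
      else (pvTokens [] (pvRepAll (PySem.Chars.stripChars w.toList ['\'']))).flatMap pvBContrib := by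
  rw [heuristic_word_to_phones_py_alt]
  simp only []
  rw [pvStrip_str w]
  by_cases hnil : PySem.Chars.stripChars w.toList ['\''] = []
  · simp [hnil]
  · rw [if_neg (by simpa using hnil), if_neg hnil]
    have hfold : pvDIGRAPHS.foldl (fun s pr => PySem.Str.replace s pr.1 pr.2)
        (String.ofList (PySem.Chars.stripChars w.toList ['\'']))
        = pvReplaceAllA (String.ofList (PySem.Chars.stripChars w.toList ['\''])) := rfl
    rw [hfold]
    rw [pvSplit₀_str, pvReplaceAllA_toList, pvToList_ofList]
    rw [pvBfold _ []]
    simp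

lemma pvAGo_char (fuel : Nat) (w : String) :
    pvAGo (fuel + 2) w = if PySem.Chars.stripChars w.toList ['\''] = [] then []
      else
        let T := pvTokens [] (pvRepAll (PySem.Chars.stripChars w.toList ['\'']))
        if T.length > 1 then T.flatMap (fun t => pvAGo (fuel + 1) (String.ofList t))
        else
          let seg := (pvRepAll (PySem.Chars.stripChars w.toList ['\''])).filterMap pvPhone
          if seg = [] then ["AH"] else seg := by
  rw [pvAGo]
  simp only []
  rw [pvStrip_str w]
  by_cases hnil : PySem.Chars.stripChars w.toList ['\''] = []
  · simp [hnil]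
  · rw [if_neg (by simpa using hnil), if_neg hnil]
    rw [pvSplit₀_str, pvReplaceAllA_toList, pvToList_ofList]
    rw [List.foldl_map, PySem.List.foldl_append_eq_flatMap]
    rw [pvAScan]
    simp

lemma pvMain (fuel : Nat) (w : String) :
    (D_heuristic_word_to_phones_py w → pvAGo (fuel + 2) w = ["AH"] ∧ heuristic_word_to_phones_py_alt w = []) ∧
    (¬ D_heuristic_word_to_phones_py w → pvAGo (fuel + 2) w = heuristic_word_to_phones_py_alt w) := by
  have hD : D_heuristic_word_to_phones_py w ↔ ((PySem.Chars.stripChars w.toList ['\'']) ≠ [] ∧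
      (∀ c ∈ PySem.Chars.stripChars w.toList ['\''], PySem.Chars.isspace c = true ∨ c = '\'') ∧
      (pvTokens [] (PySem.Chars.stripChars w.toList ['\''])).length ≤ 1) := by
    rw [D_heuristic_word_to_phones_py]
    simp only [pvStrip_str, pvSplit₀_str, pvOfList_eq_empty, pvToList_ofList, List.length_map, ne_eq]
  rw [pvAGo_char, pvAlt_char]
  set s := PySem.Chars.stripChars w.toList ['\''] with hsdef
  by_cases hnil : s = []
  · simp only [hnil, if_pos]
    exact ⟨fun hd => absurd hnil (hD.mp hd).1, fun _ => trivial⟩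
  · simp only [hnil, if_neg, not_false_iff]
    set u := pvRepAll s with hudef
    set T := pvTokens [] u with hTdef
    -- facts about tokens of u
    have htokfacts : ∀ t ∈ T, (∀ c ∈ t, PySem.Chars.isspace c = false) ∧
        pvAGo (fuel + 1) (String.ofList t) = pvBContrib t := by
      intro t ht
      rcases pvTokens_mem u [] t (by simp) ht with ⟨hinf, hws⟩
      simp only [List.nil_append] at hinf
      refine ⟨hws, pvToken_eval fuel t hws ?_ ?_ ?_ ?_ ?_⟩
      · exact fun h => pvRepAll_no_th s (h.trans hinf)
      · exact fun h => pvRepAll_no_sh s (h.trans hinf)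
      · exact fun h => pvRepAll_no_ch s (h.trans hinf)
      · exact fun h => pvRepAll_no_ng s (h.trans hinf)
      · exact fun h => pvRepAll_no_ph s (h.trans hinf)
    by_cases hlen : T.length > 1
    · -- multi-token branch: A recurses into each token
      rw [if_pos hlen]
      have hA : T.flatMap (fun t => pvAGo (fuel + 1) (String.ofList t)) = T.flatMap pvBContrib := by
        simp only [List.flatMap_def]
        exact congrArg List.flatten (List.map_congr_left (fun t ht => (htokfacts t ht).2))
      constructor
      · intro hd
        exfalso
        rcases hD.mp hd with ⟨-, hwsap, hlen1⟩
        rw [hTdef, hudef, pvRepAll_id_of_wsap s hwsap] at hlen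
        omega
      · intro _; rw [hA]
    · rw [if_neg hlen]
      by_cases hwsap : ∀ c ∈ s, PySem.Chars.isspace c = true ∨ c = '\''
      · -- the D_ region: blank/apostrophe-only word
        have hus : u = s := by rw [hudef]; exact pvRepAll_id_of_wsap s hwsap
        have hd : D_heuristic_word_to_phones_py w := hD.mpr ⟨hnil, hwsap, by rw [← hus, ← hTdef]; omega⟩
        have hscan : u.filterMap pvPhone = [] := by
          apply pvFilterMap_nil
          intro c hc
          rcases hwsap c (by rw [← hus]; exact hc) with h1 | h1
          · exact pvPhone_space c h1
          · subst h1; decide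
        have hB : T.flatMap pvBContrib = [] := by
          match hT : T, hlen with
          | [], _ => simp
          | [t], _ =>
            have ht : t ∈ T := by rw [hT]; simp
            rcases pvTokens_mem u [] t (by simp) ht with ⟨hinf, hws⟩
            have hall : ∀ c ∈ t, c = '\'' := by
              intro c hc
              rcases hwsap c (by rw [← hus]; exact hinf.subset hc) with h1 | h1
              · rw [hws c hc] at h1; exact Bool.noConfusion h1
              · exact h1
            have : PySem.Chars.stripChars t ['\''] = [] := (pvStrip_nil_iff t).mpr hall
            simp [pvBContrib, this]
          | t1 :: t2 :: rest, hlen => simp at hlen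
        refine ⟨fun _ => ⟨by simp [hscan], hB⟩, fun hnd => absurd hd hnd⟩
      · -- a real word: some non-space, non-apostrophe character exists
        simp only [not_forall] at hwsap
        rcases hwsap with ⟨c0, hc0, hcore⟩
        have hcore' : PySem.Chars.isspace c0 = false ∧ c0 ≠ '\'' := by
          rw [not_or] at hcore
          exact ⟨by simpa using hcore.1, hcore.2⟩
        have hnd : ¬ D_heuristic_word_to_phones_py w := by
          intro hd
          rcases hD.mp hd with ⟨-, hwsap2, -⟩
          rcases hwsap2 c0 hc0 with h1 | h1
          · rw [hcore'.1] at h1; exact Bool.noConfusion h1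
          · exact hcore'.2 h1
        -- the core character survives into u, hence there is exactly one token t
        have hcoreu : ∃ c ∈ u, PySem.Chars.isspace c = false ∧ c ≠ '\'' := by
          rw [hudef]
          exact pvRepAll_core s ⟨c0, hc0, hcore'⟩
        have hflat := pvTokens_flat
          (fun c => if PySem.Chars.isspace c = false ∧ c ≠ '\'' then some c else none)
          (by intro c h; simp [h]) u []
        rw [← hTdef] at hflat
        simp only [List.filterMap_nil, List.nil_append] at hflat
        have hne : T.flatMap (List.filterMap
            (fun c => if PySem.Chars.isspace c = false ∧ c ≠ '\'' then some c else none)) ≠ [] := by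
          rw [hflat]
          rcases hcoreu with ⟨c, hc, hcc⟩
          intro hemp
          have : c ∈ List.filterMap
              (fun c => if PySem.Chars.isspace c = false ∧ c ≠ '\'' then some c else none) u := by
            rw [List.mem_filterMap]
            exact ⟨c, hc, by simp [hcc.1, hcc.2]⟩
          rw [hemp] at this
          simp at this
        refine ⟨fun hd => absurd hd hnd, fun _ => ?_⟩
        match hT : T, hlen, hne with
        | [], _, hne => simp at hne
        | [t], _, hne =>
          have ht : t ∈ T := by rw [hT]; simp
          rcases pvTokens_mem u [] t (by simp) ht with ⟨hinf, hws⟩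
          -- t contains a core character, so its strip is non-empty
          have htc : ∃ c ∈ t, PySem.Chars.isspace c = false ∧ c ≠ '\'' := by
            simp only [List.flatMap_cons, List.flatMap_nil, List.append_nil] at hne
            rcases List.exists_mem_of_ne_nil _ hne with ⟨c, hc⟩
            rw [List.mem_filterMap] at hc
            rcases hc with ⟨a, ha, hfa⟩
            by_cases hcond : PySem.Chars.isspace a = false ∧ a ≠ '\''
            · simp [hcond] at hfa; subst hfa; exact ⟨a, ha, hcond⟩
            · simp [hcond] at hfa
          have hstripne : PySem.Chars.stripChars t ['\''] ≠ [] := by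
            intro hemp
            rcases htc with ⟨c, hc, hcc⟩
            exact hcc.2 ((pvStrip_nil_iff t).mp hemp c hc)
          -- A's scan over u equals the scan over t, which survives stripping
          have hscan : u.filterMap pvPhone
              = (PySem.Chars.stripChars t ['\'']).filterMap pvPhone := by
            have h1 := pvTokens_flat pvPhone pvPhone_space u []
            simp only [List.flatMap_cons, List.flatMap_nil, List.append_nil,
              List.filterMap_nil, List.nil_append] at h1
            rw [← h1, pvFilterMap_strip pvPhone (by decide) t, ← hTdef]
            simp
          simp only [List.flatMap_cons, List.flatMap_nil, List.append_nil, pvBContrib]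
          rw [if_neg hstripne, hscan]
        | t1 :: t2 :: rest, hlen, _ => simp at hlen

-- ===== VERDICT (by name: the statement is the Claim_ definition above) =====
theorem heuristic_word_to_phones_py_spec : Claim_unchanged_heuristic_word_to_phones_py := by
  intro w _
  unfold Spec_heuristic_word_to_phones_py
  intro hnd
  unfold heuristic_word_to_phones_py
  exact (pvMain w.length w).2 hnd

theorem heuristic_word_to_phones_py_changed : Claim_changed_heuristic_word_to_phones_py := by
  unfold Claim_changed_heuristic_word_to_phones_py
  refine ⟨by decide, ⟨by decide, ?_, by decide⟩, by decide, by decide, by decide⟩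
  intro c hc
  rw [show (PySem.Str.stripChars pvDiffWitness_heuristic_word_to_phones_py "'").toList = [' ']
    from by decide] at hc
  simp at hc
  subst hc
  left
  decide

theorem heuristic_word_to_phones_py_tight : Claim_exact_heuristic_word_to_phones_py := by
  intro w _ hd
  have h := (pvMain w.length w).1 hd
  unfold heuristic_word_to_phones_py
  rw [h.1, h.2]
  simp
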